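-- pv_equiv track=rewrite | github.com/Saima-Chaity/Leetcode | OA/Choose A Flask.py | chooseFlask
-- ===== SOURCE A (Python) =====
-- from collections import defaultdict, Counter
--
-- def chooseFlask(numOrders, requirements, flaskTypes, totalMarks, markings):
--
--     def getMin(requirement, markings):
--         current = float('inf')
--         for marking in markings:
--             if marking > requirement:
--                 current = min(current, marking)
--         return current
--
--
--     mapping_requirements = Counter(requirements)
--     mapping_markings = defaultdict(list)
--     for type, marking in markings:
--         mapping_markings[type].append(marking)
--
--     minimumWaste = float('inf')
--     type = -1
--
--     for i in range(flaskTypes):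
--         markings = mapping_markings[i]
--         processedAll = True
--         current_waste = 0
--         mark = 0
--         for requirement, freq in mapping_requirements.items():
--             if requirement > mark:
--                 mark = getMin(requirement, markings)
--                 if mark == float('inf'):
--                     processedAll = False
--                     break
--             current_waste += (mark - requirement) * freq
--         if current_waste < minimumWaste and processedAll:
--             minimumWaste = current_waste
--             type = i
--     return type
-- ===== SOURCE B (Python) =====
-- from collections import Counter
--
--
-- def _bisect_right(ms, x):
--     # textbook bisect.bisect_right (A's module does not import bisect)
--     lo, hi = 0, len(ms)
--     while lo < hi:
--         mid = (lo + hi) // 2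
--         if x < ms[mid]:
--             hi = mid
--         else:
--             lo = mid + 1
--     return lo
--
--
-- def chooseFlask(numOrders, requirements, flaskTypes, totalMarks, markings):
--     items = list(Counter(requirements).items())
--
--     def waste(ms):
--         # ms sorted; single pass over the distinct requirements carrying
--         # (current marking, accumulated waste); None = type cannot serve all
--         cur, total = 0, 0
--         for req, f in items:
--             if req > cur:
--                 j = _bisect_right(ms, req)
--                 if j == len(ms):
--                     return None
--                 cur = ms[j]
--             total += (cur - req) * f
--         return total
--
--     by_type = {}
--     for t, m in markings:
--         by_type.setdefault(t, []).append(m)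
--     sorted_ms = {t: sorted(v) for t, v in by_type.items()}
--
--     candidates = []
--     for i in range(flaskTypes):
--         w = waste(sorted_ms.get(i, []))
--         if w is not None:
--             candidates.append((w, i))
--     if not candidates:
--         return -1
--     return min(candidates)[1]
-- ===== Notes on version B (the rewrite author's own statement) =====
-- stated objective: alternative
-- what changed: B replaces A's best-so-far fold with per-requirement linear min-scans by grouping markings per type once, sorting each group, binary-searching (bisect_right) the smallest strictly greater marking per distinct requirement in a single Option-state pass, and taking the lexicographic min over collected (waste, type) candidates.
import Mathlib
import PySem

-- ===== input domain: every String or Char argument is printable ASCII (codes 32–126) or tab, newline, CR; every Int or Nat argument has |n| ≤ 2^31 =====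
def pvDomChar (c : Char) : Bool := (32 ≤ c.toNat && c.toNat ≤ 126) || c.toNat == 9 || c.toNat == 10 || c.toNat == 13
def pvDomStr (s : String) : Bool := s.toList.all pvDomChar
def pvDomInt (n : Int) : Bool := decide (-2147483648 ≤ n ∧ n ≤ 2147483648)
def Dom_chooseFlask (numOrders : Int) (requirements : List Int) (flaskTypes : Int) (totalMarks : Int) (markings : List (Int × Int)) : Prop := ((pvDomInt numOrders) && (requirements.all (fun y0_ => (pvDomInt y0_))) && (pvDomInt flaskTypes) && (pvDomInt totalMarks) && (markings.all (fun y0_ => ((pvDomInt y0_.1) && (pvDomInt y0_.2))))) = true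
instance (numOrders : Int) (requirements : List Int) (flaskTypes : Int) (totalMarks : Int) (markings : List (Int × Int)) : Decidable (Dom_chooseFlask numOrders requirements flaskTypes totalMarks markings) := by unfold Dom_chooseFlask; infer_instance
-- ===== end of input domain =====

-- A: per requirement, a full linear min-scan of the type's markings inside a best-so-far
-- fold.  B: per type, filter + sort the markings once and binary-search (bisect_right)
-- each requirement, collecting (waste, type) candidates and taking their lexicographic
-- minimum.  Neither program mutates its arguments observably.

-- ===== PORT A =====

-- getMin(requirement, markings): running min over markings strictly greater than
-- requirement; none plays float('inf') (no qualifying marking).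
def pvGetMinA (req : Int) (ms : List Int) : Option Int :=
  ms.foldl (fun cur m =>
    if req < m then
      match cur with
      | none => some m
      | some c => some (min c m)
    else cur) none

-- the inner `for requirement, freq in mapping_requirements.items()` loop of A:
-- returns some waste when it runs to completion, none when it breaks (processedAll=False)
def pvInnerA (ms : List Int) : List (Int × Int) → Int → Int → Option Int
  | [], _, waste => some waste
  | (req, freq) :: rest, mark, waste =>
    if mark < req then
      match pvGetMinA req ms with
      | none => none
      | some m => pvInnerA ms rest m (waste + (m - req) * freq)
    else pvInnerA ms rest mark (waste + (mark - req) * freq)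

def chooseFlask (numOrders : Int) (requirements : List Int) (flaskTypes : Int) (totalMarks : Int) (markings : List (Int × Int)) : Int :=
  let reqItems := (PySem.Dict.counter requirements).items
  -- defaultdict(list): mapping_markings[type].append(marking)
  let mmap := markings.foldl (fun d p => d.modify p.1 [] (fun l => l ++ [p.2]))
    (PySem.Dict.empty : PySem.Dict Int (List Int))
  -- state = (minimumWaste, type); none plays float('inf')
  let st := (PySem.List.pyRange 0 flaskTypes 1).foldl (fun (st : Option Int × Int) i =>
    match pvInnerA (mmap.getD i []) reqItems 0 0 with
    | none => st                               -- processedAll = False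
    | some w =>
      match st.1 with
      | none => (some w, i)
      | some mw => if w < mw then (some w, i) else st) (none, -1)
  st.2

-- ===== PORT B =====

-- j = _bisect_right(ms, x); if j == len(ms): not found else ms[j]
-- (_bisect_right in Source B is exactly bisect.bisect_right = PySem.List.bisectRight;
--  ms.getD j 0 is ms[j], in range because j < ms.length on that branch)
def pvBisectLookup (ms : List Int) (x : Int) : Option Int :=
  let j := PySem.List.bisectRight ms x
  if j = ms.length then none else some (ms.getD j 0)

-- one step of waste(ms): state = some (current marking, accumulated waste), none = failed
def pvWasteStep (ms : List Int) (st : Option (Int × Int)) (p : Int × Int) : Option (Int × Int) :=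
  st.bind (fun s =>
    if s.1 < p.1 then
      (pvBisectLookup ms p.1).map (fun m => (m, s.2 + (m - p.1) * p.2))
    else some (s.1, s.2 + (s.1 - p.1) * p.2))

-- waste(ms) of Source B: single pass over the distinct requirements
def pvWasteB (ms : List Int) (items : List (Int × Int)) : Option Int :=
  (items.foldl (pvWasteStep ms) (some (0, 0))).map Prod.snd

-- Python tuple min: keep the lexicographically smaller, first on ties
def pvLexPick (b p : Int × Int) : Int × Int :=
  if p.1 < b.1 ∨ (p.1 = b.1 ∧ p.2 < b.2) then p else b

def chooseFlask_alt (numOrders : Int) (requirements : List Int) (flaskTypes : Int) (totalMarks : Int) (markings : List (Int × Int)) : Int :=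
  let items := (PySem.Dict.counter requirements).items
  -- by_type.setdefault(t, []).append(m)
  let byType := markings.foldl (fun d p => d.modify p.1 [] (fun l => l ++ [p.2]))
    (PySem.Dict.empty : PySem.Dict Int (List Int))
  -- sorted_ms = {t: sorted(v) for t, v in by_type.items()}
  let sortedMs := PySem.Dict.mk (byType.items.map (fun p => (p.1, PySem.List.sorted p.2 (fun x => x))))
  -- candidates: (waste, i) for each feasible type i
  let candidates := (PySem.List.pyRange 0 flaskTypes 1).filterMap (fun i =>
    (pvWasteB (sortedMs.getD i []) items).map (fun w => (w, i)))
  -- if not candidates: return -1; return min(candidates)[1]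
  match candidates with
  | [] => -1
  | v :: rest => (rest.foldl pvLexPick v).2

-- ===== PRECONDITION & SPEC =====
def Spec_chooseFlask (numOrders : Int) (requirements : List Int) (flaskTypes : Int) (totalMarks : Int) (markings : List (Int × Int)) (out : Int) : Prop := out = chooseFlask_alt numOrders requirements flaskTypes totalMarks markings
instance (numOrders : Int) (requirements : List Int) (flaskTypes : Int) (totalMarks : Int) (markings : List (Int × Int)) (out : Int) : Decidable (Spec_chooseFlask numOrders requirements flaskTypes totalMarks markings out) := by unfold Spec_chooseFlask; infer_instance

-- ===== CLAIM (what is proved, stated in full; the proofs are below) =====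
def Claim_equal_chooseFlask : Prop := ∀ (numOrders : Int) (requirements : List Int) (flaskTypes : Int) (totalMarks : Int) (markings : List (Int × Int)), Dom_chooseFlask numOrders requirements flaskTypes totalMarks markings → Spec_chooseFlask numOrders requirements flaskTypes totalMarks markings (chooseFlask numOrders requirements flaskTypes totalMarks markings)

-- ===== LEMMAS AND PROOFS =====

-- skip-fold = fold over the filtered list
theorem pv_foldl_filter_if {α β : Type} (p : α → Prop) [DecidablePred p] (g : β → α → β) :
    ∀ (l : List α) (init : β),
      l.foldl (fun cur m => if p m then g cur m else cur) init
        = (l.filter (fun m => decide (p m))).foldl g init := by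
  intro l
  induction l with
  | nil => intro init; rfl
  | cons x t ih =>
    intro init
    by_cases hx : p x <;> simp [hx, ih]

-- the qualifying-min fold, started at some c, is the running min
theorem pv_foldl_optmin_some (t : List Int) : ∀ (c : Int),
    t.foldl (fun cur m =>
      match cur with
      | none => some m
      | some c => some (min c m)) (some c) = some (t.foldl min c) := by
  induction t with
  | nil => intro c; rfl
  | cons x t ih => intro c; simpa using ih (min c x)

-- the qualifying-min fold is min? of the list (key = id)
theorem pv_foldl_optmin (l : List Int) :
    l.foldl (fun cur m =>
      match cur with
      | none => some m
      | some c => some (min c m)) none = PySem.List.min? l (fun x => x) := by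
  cases l with
  | nil => rfl
  | cons x t => rw [PySem.List.min?_id_cons]; simpa using pv_foldl_optmin_some t x

-- A's getMin is min(filter(> req))
theorem pvGetMinA_eq_min?_filter (req : Int) (ms : List Int) :
    pvGetMinA req ms = PySem.List.min? (ms.filter (fun m => decide (req < m))) (fun x => x) := by
  unfold pvGetMinA
  rw [pv_foldl_filter_if (fun m => req < m), pv_foldl_optmin]

-- min? with the identity key is determined by the multiset of elements
theorem pv_min?_perm {xs ys : List Int} (h : xs.Perm ys) :
    PySem.List.min? xs (fun x => x) = PySem.List.min? ys (fun x => x) := by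
  cases hx : PySem.List.min? xs (fun x => x) with
  | none =>
    rw [PySem.List.min?_eq_none_iff] at hx
    subst hx
    rw [eq_comm, PySem.List.min?_eq_none_iff]
    exact h.symm.eq_nil
  | some a =>
    cases hy : PySem.List.min? ys (fun x => x) with
    | none =>
      rw [PySem.List.min?_eq_none_iff] at hy
      subst hy
      rw [h.eq_nil] at hx
      simp [PySem.List.min?] at hx
    | some b =>
      have hab : a ≤ b := PySem.List.min?_isMin hx b (h.mem_iff.mpr (PySem.List.min?_mem hy))
      have hba : b ≤ a := PySem.List.min?_isMin hy a (h.mem_iff.mp (PySem.List.min?_mem hx))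
      exact congrArg some (le_antisymm hab hba)

-- B's binary-search lookup on the sorted markings computes A's getMin
theorem pvBisectLookup_sorted_eq_getMinA (ms : List Int) (x : Int) :
    pvBisectLookup (PySem.List.sorted ms (fun y => y)) x = pvGetMinA x ms := by
  have hperm : (PySem.List.sorted ms (fun y => y)).Perm ms := PySem.List.sorted_perm ms (fun y => y) false
  rw [pvGetMinA_eq_min?_filter,
      ← pv_min?_perm (hperm.filter (fun m => decide (x < m)))]
  set xs := PySem.List.sorted ms (fun y => y) with hxs
  have hpw : List.Pairwise (fun a b => a ≤ b) xs := by
    simpa using PySem.List.sorted_pairwise ms (fun y => y)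
  obtain ⟨hle, hpre, hsuf⟩ := PySem.List.bisectRight_spec xs x hpw
  unfold pvBisectLookup
  by_cases hj : PySem.List.bisectRight xs x = xs.length
  · rw [if_pos hj, eq_comm, PySem.List.min?_eq_none_iff, List.filter_eq_nil_iff]
    intro a ha
    obtain ⟨k, hk, rfl⟩ := List.mem_iff_getElem.mp ha
    simpa using not_lt.mpr (hpre k hk (hj ▸ hk))
  · have hjlt : PySem.List.bisectRight xs x < xs.length := lt_of_le_of_ne hle hj
    rw [if_neg hj, List.getD_eq_getElem xs 0 hjlt]
    have hmemf : xs[PySem.List.bisectRight xs x] ∈ xs.filter (fun m => decide (x < m)) :=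
      List.mem_filter.mpr ⟨List.getElem_mem hjlt, by simpa using hsuf _ hjlt le_rfl⟩
    cases hm : PySem.List.min? (xs.filter (fun m => decide (x < m))) (fun y => y) with
    | none =>
      rw [PySem.List.min?_eq_none_iff] at hm
      rw [hm] at hmemf
      simp at hmemf
    | some m =>
      have h1 : m ≤ xs[PySem.List.bisectRight xs x] := PySem.List.min?_isMin hm _ hmemf
      have hmf := PySem.List.min?_mem hm
      obtain ⟨hmx, hxm⟩ := List.mem_filter.mp hmf
      obtain ⟨k, hk, hke⟩ := List.mem_iff_getElem.mp hmx
      have hjk : PySem.List.bisectRight xs x ≤ k := by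
        by_contra hlt
        have := hpre k hk (not_le.mp hlt)
        rw [hke] at this
        simp at hxm
        omega
      have h2 : xs[PySem.List.bisectRight xs x] ≤ m := by
        rw [← hke]
        exact PySem.List.sorted_id_getElem_mono ms hjk hk
      exact congrArg some (le_antisymm h2 h1)

-- a failed waste pass stays failed
theorem pvWasteStep_none (ms : List Int) (items : List (Int × Int)) :
    items.foldl (pvWasteStep ms) none = none := by
  induction items with
  | nil => rfl
  | cons p rest ih => simpa [pvWasteStep] using ih

-- B's Option-state fold over the sorted markings computes A's inner recursion
theorem pvWasteB_fold_eq_pvInnerA (ms : List Int) (items : List (Int × Int)) :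
    ∀ (cur total : Int),
      (items.foldl (pvWasteStep (PySem.List.sorted ms (fun y => y))) (some (cur, total))).map Prod.snd
        = pvInnerA ms items cur total := by
  induction items with
  | nil => intro cur total; rfl
  | cons p rest ih =>
    intro cur total
    obtain ⟨req, freq⟩ := p
    simp only [pvInnerA, List.foldl_cons]
    by_cases hc : cur < req
    · rw [show pvWasteStep (PySem.List.sorted ms (fun y => y)) (some (cur, total)) (req, freq)
          = (pvGetMinA req ms).map (fun m => (m, total + (m - req) * freq)) by
        simp [pvWasteStep, hc, pvBisectLookup_sorted_eq_getMinA]]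
      rw [if_pos hc]
      cases pvGetMinA req ms with
      | none => simp [pvWasteStep_none]
      | some m => simpa using ih m (total + (m - req) * freq)
    · rw [show pvWasteStep (PySem.List.sorted ms (fun y => y)) (some (cur, total)) (req, freq)
          = some (cur, total + (cur - req) * freq) by simp [pvWasteStep, hc]]
      rw [if_neg hc]
      exact ih cur (total + (cur - req) * freq)

theorem pvWasteB_sorted_eq_pvInnerA (ms : List Int) (items : List (Int × Int)) :
    pvWasteB (PySem.List.sorted ms (fun y => y)) items = pvInnerA ms items 0 0 := by
  unfold pvWasteB
  exact pvWasteB_fold_eq_pvInnerA ms items 0 0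

-- per-key sorting of a dict's values, read back through getD
theorem pv_getD_mk_map_sorted (d : PySem.Dict Int (List Int)) (k : Int) :
    (PySem.Dict.mk (d.items.map (fun p => (p.1, PySem.List.sorted p.2 (fun x => x))))).getD k []
      = PySem.List.sorted (d.getD k []) (fun x => x) := by
  obtain ⟨l⟩ := d
  induction l with
  | nil => rfl
  | cons p rest ih =>
    obtain ⟨key, v⟩ := p
    simp only [List.map_cons, PySem.Dict.getD_eq_get?_getD, PySem.Dict.get?_mk_cons] at *
    by_cases hk : key = k
    · simp [hk]
    · simpa [hk] using ih

-- A's best-so-far fold, started at some state, is B's lexicographic-min fold over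
-- the (waste, index) candidates, provided all remaining indices exceed the current one
theorem pv_sel_some (h : Int → Option Int) :
    ∀ (L : List Int) (mw ti : Int), (∀ i ∈ L, ti < i) → L.Pairwise (· < ·) →
      L.foldl (fun st i =>
          match h i with
          | none => st
          | some w =>
            match st.1 with
            | none => (some w, i)
            | some mw' => if w < mw' then (some w, i) else st) ((some mw : Option Int), ti)
      = (some ((L.filterMap (fun i => (h i).map (fun w => (w, i)))).foldl pvLexPick (mw, ti)).1,
          ((L.filterMap (fun i => (h i).map (fun w => (w, i)))).foldl pvLexPick (mw, ti)).2) := by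
  intro L
  induction L with
  | nil => intro mw ti _ _; rfl
  | cons i t ih =>
    intro mw ti hmem hpw
    have hti : ti < i := hmem i (List.mem_cons_self ..)
    have hpt := (List.pairwise_cons.mp hpw).2
    have hit := (List.pairwise_cons.mp hpw).1
    cases hi : h i with
    | none =>
      simp only [List.foldl_cons, List.filterMap_cons, hi, Option.map_none]
      exact ih mw ti (fun j hj => hmem j (List.mem_cons_of_mem _ hj)) hpt
    | some w =>
      simp only [List.foldl_cons, List.filterMap_cons, hi, Option.map_some]
      by_cases hw : w < mw
      · rw [show pvLexPick (mw, ti) (w, i) = (w, i) by simp [pvLexPick, hw]]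
        simp only [hw]
        exact ih w i hit hpt
      · rw [show pvLexPick (mw, ti) (w, i) = (mw, ti) by
          have : ¬ (w < mw ∨ (w = mw ∧ i < ti)) := by
            rintro (h1 | ⟨h1, h2⟩); exact hw h1; omega
          simp [pvLexPick, this]]
        simp only [if_neg hw]
        exact ih mw ti (fun j hj => hmem j (List.mem_cons_of_mem _ hj)) hpt

-- top form: A's fold from (none, -1) versus B's candidate list and min
theorem pv_sel_top (h : Int → Option Int) :
    ∀ (L : List Int), L.Pairwise (· < ·) →
      (L.foldl (fun st i =>
          match h i with
          | none => st
          | some w =>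
            match st.1 with
            | none => (some w, i)
            | some mw' => if w < mw' then (some w, i) else st) ((none : Option Int), (-1 : Int))).2
      = (match L.filterMap (fun i => (h i).map (fun w => (w, i))) with
         | [] => (-1 : Int)
         | v :: rest => (rest.foldl pvLexPick v).2) := by
  intro L
  induction L with
  | nil => intro _; rfl
  | cons i t ih =>
    intro hpw
    have hpt := (List.pairwise_cons.mp hpw).2
    have hit := (List.pairwise_cons.mp hpw).1
    cases hi : h i with
    | none =>
      simp only [List.foldl_cons, List.filterMap_cons, hi, Option.map_none]
      exact ih hpt
    | some w =>
      simp only [List.foldl_cons, List.filterMap_cons, hi, Option.map_some]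
      rw [pv_sel_some h t w i hit hpt]

-- ===== VERDICT (by name: the statement is the Claim_ definition above) =====
theorem chooseFlask_spec : Claim_equal_chooseFlask := by
  intro numOrders requirements flaskTypes totalMarks markings _
  unfold Spec_chooseFlask chooseFlask chooseFlask_alt
  simp only []
  have hinner : ∀ i : Int,
      pvWasteB ((PySem.Dict.mk (((markings.foldl (fun d p => d.modify p.1 [] (fun l => l ++ [p.2]))
          (PySem.Dict.empty : PySem.Dict Int (List Int))).items).map
            (fun p => (p.1, PySem.List.sorted p.2 (fun x => x))))).getD i [])
        ((PySem.Dict.counter requirements).items)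
      = pvInnerA ((markings.foldl (fun d p => d.modify p.1 [] (fun l => l ++ [p.2]))
          (PySem.Dict.empty : PySem.Dict Int (List Int))).getD i [])
          ((PySem.Dict.counter requirements).items) 0 0 := by
    intro i
    rw [pv_getD_mk_map_sorted, pvWasteB_sorted_eq_pvInnerA]
  calc (((PySem.List.pyRange 0 flaskTypes 1).foldl (fun (st : Option Int × Int) i =>
        match pvInnerA ((markings.foldl (fun d p => d.modify p.1 [] (fun l => l ++ [p.2]))
            (PySem.Dict.empty : PySem.Dict Int (List Int))).getD i [])
            ((PySem.Dict.counter requirements).items) 0 0 with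
        | none => st
        | some w =>
          match st.1 with
          | none => (some w, i)
          | some mw => if w < mw then (some w, i) else st) (none, -1)).2)
      = (match (PySem.List.pyRange 0 flaskTypes 1).filterMap (fun i =>
          (pvWasteB ((PySem.Dict.mk (((markings.foldl (fun d p => d.modify p.1 [] (fun l => l ++ [p.2]))
            (PySem.Dict.empty : PySem.Dict Int (List Int))).items).map
              (fun p => (p.1, PySem.List.sorted p.2 (fun x => x))))).getD i [])
            ((PySem.Dict.counter requirements).items)).map (fun w => (w, i))) with
         | [] => (-1 : Int)
         | v :: rest => (rest.foldl pvLexPick v).2) := by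
        simp only [hinner]
        exact pv_sel_top _ (PySem.List.pyRange 0 flaskTypes 1)
          (PySem.List.pairwise_lt_pyRange_one 0 flaskTypes)
    _ = _ := rfl
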